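-- pv_equiv track=rewrite | github.com/Laincetta/yandex-practicum-algos | sprint-08/tasks/e_lines_inserting.py | insert_lines
-- ===== SOURCE A (Python) =====
-- from collections import defaultdict
--
-- def insert_lines(init_line: str, lines: list[tuple[str, int]], n: int) -> str:
--     inserts = defaultdict(list)
--     for t_i, pos in lines:
--         inserts[pos].append(t_i)
--
--     result = []
--     for i in range(len(init_line) + 1):
--         if i in inserts:
--             result.extend(inserts[i])
--         if i < len(init_line):
--             result.append(init_line[i])
--     return ''.join(result)
-- ===== SOURCE B (Python) =====
-- def insert_lines(init_line: str, lines: list[tuple[str, int]], n: int) -> str: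
--     valid = [tp for tp in lines if 0 <= tp[1] <= len(init_line)]
--     parts = []
--     prev = 0
--     for t, pos in sorted(valid, key=lambda tp: tp[1]):
--         parts.append(init_line[prev:pos])
--         parts.append(t)
--         prev = pos
--     parts.append(init_line[prev:])
--     return ''.join(parts)
-- ===== Notes on version B (the rewrite author's own statement) =====
-- stated objective: alternative
-- what changed: Replaces A's position-keyed defaultdict plus a per-character scan of every index 0..len with a filter of in-range inserts, one stable sort by position, and a single cursor pass that emits slices between consecutive insert positions.
import Mathlib
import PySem

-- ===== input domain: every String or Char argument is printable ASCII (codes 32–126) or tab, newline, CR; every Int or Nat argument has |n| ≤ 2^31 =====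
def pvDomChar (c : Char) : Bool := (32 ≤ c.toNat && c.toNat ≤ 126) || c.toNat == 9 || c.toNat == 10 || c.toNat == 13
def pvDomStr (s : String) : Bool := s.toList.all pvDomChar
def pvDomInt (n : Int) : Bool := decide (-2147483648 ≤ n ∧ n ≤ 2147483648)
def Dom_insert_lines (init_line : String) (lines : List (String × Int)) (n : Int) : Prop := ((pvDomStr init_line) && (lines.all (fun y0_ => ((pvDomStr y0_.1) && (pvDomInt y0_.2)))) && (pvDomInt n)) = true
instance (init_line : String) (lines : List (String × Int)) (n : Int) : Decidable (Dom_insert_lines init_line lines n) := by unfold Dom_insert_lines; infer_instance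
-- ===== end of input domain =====

-- B replaces A's defaultdict plus a scan of every index 0..len by a filter of in-range inserts,
-- a stable sort by position, and one cursor pass over slices (objective: alternative algorithm).

-- ===== PORT A =====
def insert_lines (init_line : String) (lines : List (String × Int)) (_n : Int) : String :=
  let inserts : PySem.Dict Int (List String) :=
    lines.foldl (fun d tp => d.modify tp.2 [] (· ++ [tp.1])) PySem.Dict.empty
  let result : List String :=
    (PySem.List.pyRange 0 (PySem.Str.len init_line + 1) 1).foldl
      (fun acc i =>
        let acc := if inserts.contains i then acc ++ inserts.getD i [] else acc
        if i < PySem.Str.len init_line then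
          acc ++ [String.ofList [PySem.List.pyGetD init_line.toList i ' ']]
        else acc)
      []
  PySem.Str.join "" result

-- ===== PORT B =====
def insert_lines_alt (init_line : String) (lines : List (String × Int)) (_n : Int) : String :=
  let valid := lines.filter (fun tp => decide (0 ≤ tp.2) && decide (tp.2 ≤ PySem.Str.len init_line))
  let fin :=
    (PySem.List.sorted valid (fun tp => tp.2)).foldl
      (fun (st : List String × Int) tp =>
        (st.1 ++ [PySem.Str.slice init_line (some st.2) (some tp.2), tp.1], tp.2))
      ([], 0)
  PySem.Str.join "" (fin.1 ++ [PySem.Str.slice init_line (some fin.2) none])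

-- ===== PRECONDITION & SPEC =====
def Spec_insert_lines (init_line : String) (lines : List (String × Int)) (n : Int) (out : String) : Prop := out = insert_lines_alt init_line lines n
instance (init_line : String) (lines : List (String × Int)) (n : Int) (out : String) : Decidable (Spec_insert_lines init_line lines n out) := by unfold Spec_insert_lines; infer_instance

-- ===== CLAIM (what is proved, stated in full; the proofs are below) =====
def Claim_equal_insert_lines : Prop := ∀ (init_line : String) (lines : List (String × Int)) (n : Int), Dom_insert_lines init_line lines n → Spec_insert_lines init_line lines n (insert_lines init_line lines n)

-- ===== LEMMAS AND PROOFS =====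

-- one text-or-char piece of the output at position i, char level
def pvPiece (cs : List Char) (lines' : List (String × Int)) (i : Int) : List Char :=
  ((lines'.filter (fun tp => tp.2 == i)).map (fun tp => tp.1.toList)).flatten ++
    (if i < (cs.length : Int) then [PySem.List.pyGetD cs i ' '] else [])

-- the same piece, as A's list-of-strings fragment
def pvPieceS (cs : List Char) (lines' : List (String × Int)) (i : Int) : List String :=
  (lines'.filter (fun tp => tp.2 == i)).map (fun tp => tp.1) ++
    (if i < (cs.length : Int) then [String.ofList [PySem.List.pyGetD cs i ' ']] else [])

-- the whole output, char level
def pvCanon (cs : List Char) (lines' : List (String × Int)) : List Char :=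
  (PySem.List.pyRange 0 ((cs.length : Int) + 1) 1).flatMap (pvPiece cs lines')

def pvJoin (xs : List String) : List Char := (xs.map String.toList).flatten

-- B's cursor pass, char level, as a structural recursion
def pvBf (cs : List Char) (prev : Int) (M : List (String × Int)) : List Char :=
  match M with
  | [] => PySem.List.slice cs (some prev) none
  | (t, p) :: r => PySem.List.slice cs (some prev) (some p) ++ t.toList ++ pvBf cs p r

-- the stable-sorted list, regrouped by position
def pvGroups (l : List (String × Int)) (a b : Int) : List (String × Int) :=
  (PySem.List.pyRange a b 1).flatMap (fun i => l.filter (fun tp => tp.2 == i))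

lemma pvFlatMap_congr {α β : Type} {l : List α} {f g : α → List β}
    (h : ∀ x ∈ l, f x = g x) : l.flatMap f = l.flatMap g := by
  induction l with
  | nil => rfl
  | cons a t ih => simp_all [List.flatMap_cons]

lemma pvIntercalate_nil (l : List (List Char)) : List.intercalate [] l = l.flatten := by
  induction l with
  | nil => rfl
  | cons x t ih => cases t <;> simp_all [List.intercalate, List.intersperse, List.flatten]

lemma pvJoin_str (xs : List String) : (PySem.Str.join "" xs).toList = pvJoin xs := by
  rw [PySem.Str.toList_join]
  simp [PySem.Chars.join, pvJoin, pvIntercalate_nil]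

lemma pvJoin_append (xs ys : List String) : pvJoin (xs ++ ys) = pvJoin xs ++ pvJoin ys := by
  simp [pvJoin]

lemma pvJoin_flatMap (l : List Int) (g : Int → List String) :
    pvJoin (l.flatMap g) = l.flatMap (fun i => pvJoin (g i)) := by
  induction l with
  | nil => rfl
  | cons a t ih => simp [List.flatMap_cons, pvJoin_append, ih]

lemma pvJoin_pieceS (cs : List Char) (l : List (String × Int)) (i : Int) :
    pvJoin (pvPieceS cs l i) = pvPiece cs l i := by
  unfold pvPieceS pvPiece pvJoin
  rw [List.map_append, List.flatten_append]
  congr 1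
  · simp [List.map_map, Function.comp_def]
  · split <;> simp

lemma pvInsertBy_cons {α : Type} (bef : α → α → Bool) (x y : α) (ys : List α) :
    PySem.List.insertBy bef x (y :: ys) =
      if bef x y then x :: y :: ys else y :: PySem.List.insertBy bef x ys := rfl

lemma pvInsertBy_middle {α : Type} (bef : α → α → Bool) (x : α) (l₁ l₂ : List α)
    (h₁ : ∀ y ∈ l₁, bef x y = false) (h₂ : ∀ y ∈ l₂, bef x y = true) :
    PySem.List.insertBy bef x (l₁ ++ l₂) = l₁ ++ x :: l₂ := by
  induction l₁ with
  | nil =>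
    cases l₂ with
    | nil => rfl
    | cons y ys => simp [pvInsertBy_cons, h₂ y (by simp)]
  | cons z t ih =>
    have hz := h₁ z (by simp)
    simp only [List.cons_append, pvInsertBy_cons, hz, Bool.false_eq_true, if_false]
    rw [ih (fun y hy => h₁ y (by simp [hy]))]

-- inserting an in-range element into the grouped list appends it to its own group
lemma pvGroups_insert (l : List (String × Int)) (x : String × Int) (b : Int)
    (h0 : 0 ≤ x.2) (hb : x.2 < b) :
    PySem.List.insertBy (fun u v => decide (u.2 < v.2)) x (pvGroups l 0 b) =
      pvGroups (l ++ [x]) 0 b := by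
  have hsplit : pvGroups l 0 b = pvGroups l 0 (x.2 + 1) ++ pvGroups l (x.2 + 1) b := by
    unfold pvGroups
    rw [PySem.List.pyRange_one_append 0 (x.2 + 1) b (by omega) (by omega), List.flatMap_append]
  rw [hsplit]
  rw [pvInsertBy_middle _ _ _ _ ?h1 ?h2]
  case h1 =>
    intro y hy
    unfold pvGroups at hy
    simp only [List.mem_flatMap, PySem.List.mem_pyRange_one, List.mem_filter, beq_iff_eq] at hy
    obtain ⟨i, ⟨_, hi1⟩, _, hyi⟩ := hy
    simp only [decide_eq_false_iff_not]
    omega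
  case h2 =>
    intro y hy
    unfold pvGroups at hy
    simp only [List.mem_flatMap, PySem.List.mem_pyRange_one, List.mem_filter, beq_iff_eq] at hy
    obtain ⟨i, ⟨hi0, _⟩, _, hyi⟩ := hy
    simp only [decide_eq_true_eq]
    omega
  -- now the regrouping of l ++ [x]
  unfold pvGroups
  rw [PySem.List.pyRange_one_append 0 (x.2 + 1) b (by omega) (by omega), List.flatMap_append]
  have e2 : (PySem.List.pyRange (x.2 + 1) b 1).flatMap (fun i => (l ++ [x]).filter (fun tp => tp.2 == i))
      = (PySem.List.pyRange (x.2 + 1) b 1).flatMap (fun i => l.filter (fun tp => tp.2 == i)) := by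
    apply pvFlatMap_congr
    intro i hi
    rw [PySem.List.mem_pyRange_one] at hi
    rw [List.filter_append]
    have : [x].filter (fun tp => tp.2 == i) = [] := by
      simp only [List.filter_eq_nil_iff]
      intro tp htp
      simp only [List.mem_singleton] at htp
      subst htp
      simp only [beq_iff_eq]
      omega
    rw [this, List.append_nil]
  rw [e2]
  have e1 : (PySem.List.pyRange 0 (x.2 + 1) 1).flatMap (fun i => (l ++ [x]).filter (fun tp => tp.2 == i))
      = (PySem.List.pyRange 0 (x.2 + 1) 1).flatMap (fun i => l.filter (fun tp => tp.2 == i)) ++ [x] := by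
    rw [PySem.List.pyRange_one_succ_right (by omega : (0:Int) ≤ x.2)]
    rw [List.flatMap_append, List.flatMap_append]
    have ea : (PySem.List.pyRange 0 x.2 1).flatMap (fun i => (l ++ [x]).filter (fun tp => tp.2 == i))
        = (PySem.List.pyRange 0 x.2 1).flatMap (fun i => l.filter (fun tp => tp.2 == i)) := by
      apply pvFlatMap_congr
      intro i hi
      rw [PySem.List.mem_pyRange_one] at hi
      rw [List.filter_append]
      have : [x].filter (fun tp => tp.2 == i) = [] := by
        simp only [List.filter_eq_nil_iff]
        intro tp htp
        simp only [List.mem_singleton] at htp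
        subst htp
        simp only [beq_iff_eq]
        omega
      rw [this, List.append_nil]
    have eb : ([x.2] : List Int).flatMap (fun i => (l ++ [x]).filter (fun tp => tp.2 == i))
        = ([x.2] : List Int).flatMap (fun i => l.filter (fun tp => tp.2 == i)) ++ [x] := by
      simp [List.flatMap_cons, List.filter_append]
    rw [ea, eb, List.append_assoc]
  rw [e1, List.append_assoc]
  simp

-- the stable sort by position IS the regrouping by position
lemma pvSorted_eq_groups (l : List (String × Int)) (b : Int)
    (h : ∀ tp ∈ l, 0 ≤ tp.2 ∧ tp.2 < b) :
    PySem.List.sorted l (fun tp => tp.2) = pvGroups l 0 b := by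
  rw [PySem.List.sorted_eq_foldl_insertBy]
  have main : ∀ (rest pref : List (String × Int)), (∀ tp ∈ rest, 0 ≤ tp.2 ∧ tp.2 < b) →
      rest.foldl (fun acc x => PySem.List.insertBy (fun u v => decide (u.2 < v.2)) x acc)
        (pvGroups pref 0 b) = pvGroups (pref ++ rest) 0 b := by
    intro rest
    induction rest with
    | nil => intro pref _; simp
    | cons x r ih =>
      intro pref hb
      simp only [List.foldl_cons]
      rw [pvGroups_insert pref x b (hb x (by simp)).1 (hb x (by simp)).2]
      rw [ih (pref ++ [x]) (fun tp ht => hb tp (by simp [ht]))]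
      congr 1
      simp
  have h0 : pvGroups ([] : List (String × Int)) 0 b = [] := by
    simp [pvGroups, List.flatMap_eq_nil_iff]
  have := main l [] h
  rw [h0] at this
  simpa using this

-- chars j..len-1, one per range index
lemma pvTailChars (cs : List Char) (j : Nat) (h : j ≤ cs.length) :
    (PySem.List.pyRange (j : Int) ((cs.length : Int) + 1) 1).flatMap
        (fun i => if i < (cs.length : Int) then [PySem.List.pyGetD cs i ' '] else []) =
      cs.drop j := by
  suffices H : ∀ (k j : Nat), j ≤ cs.length → cs.length - j = k →
      (PySem.List.pyRange (j : Int) ((cs.length : Int) + 1) 1).flatMap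
          (fun i => if i < (cs.length : Int) then [PySem.List.pyGetD cs i ' '] else []) =
        cs.drop j from H _ j h rfl
  intro k
  induction k with
  | zero =>
    intro j hj hk
    have hj' : j = cs.length := by omega
    subst hj'
    rw [PySem.List.pyRange_one_singleton]
    simp
  | succ k ih =>
    intro j hj hk
    have hjl : j < cs.length := by omega
    rw [PySem.List.pyRange_one_cons (by omega : (j : Int) < (cs.length : Int) + 1)]
    rw [List.flatMap_cons]
    rw [if_pos (by omega : (j : Int) < (cs.length : Int))]
    rw [PySem.List.pyGetD_natCast, List.getD_eq_getElem cs ' ' hjl]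
    rw [show (j : Int) + 1 = ((j + 1 : Nat) : Int) from by push_cast; ring]
    rw [ih (j + 1) (by omega) (by omega)]
    rw [List.drop_eq_getElem_cons hjl]
    simp

lemma pvMidChars (cs : List Char) (j k : Nat) (hjk : j ≤ k) (h : k ≤ cs.length) :
    (PySem.List.pyRange (j : Int) (k : Int) 1).flatMap
        (fun i => if i < (cs.length : Int) then [PySem.List.pyGetD cs i ' '] else []) =
      (cs.drop j).take (k - j) := by
  suffices H : ∀ (d j : Nat), j ≤ k → k - j = d →
      (PySem.List.pyRange (j : Int) (k : Int) 1).flatMap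
          (fun i => if i < (cs.length : Int) then [PySem.List.pyGetD cs i ' '] else []) =
        (cs.drop j).take (k - j) from H _ j hjk rfl
  intro d
  induction d with
  | zero =>
    intro j hj hd
    have hj' : j = k := by omega
    subst hj'
    rw [PySem.List.pyRange_one_eq_nil (by omega)]
    simp
  | succ d ih =>
    intro j hj hd
    have hjl : j < cs.length := by omega
    rw [PySem.List.pyRange_one_cons (by omega : (j : Int) < (k : Int))]
    rw [List.flatMap_cons]
    rw [if_pos (by omega : (j : Int) < (cs.length : Int))]
    rw [PySem.List.pyGetD_natCast, List.getD_eq_getElem cs ' ' hjl]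
    rw [show (j : Int) + 1 = ((j + 1 : Nat) : Int) from by push_cast; ring]
    rw [ih (j + 1) (by omega) (by omega)]
    rw [show k - j = (k - (j + 1)) + 1 from by omega]
    rw [List.drop_eq_getElem_cons hjl, List.take_succ_cons]
    simp

-- main B-side lemma: the cursor pass equals the piece-by-piece canonical form
lemma pvBf_eq (cs : List Char) (M : List (String × Int)) (a : Int)
    (ha0 : 0 ≤ a) (hal : a ≤ (cs.length : Int))
    (hM : ∀ tp ∈ M, a ≤ tp.2 ∧ tp.2 ≤ (cs.length : Int))
    (hs : M.Pairwise (fun u v => u.2 ≤ v.2)) :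
    pvBf cs a M =
      (PySem.List.pyRange a ((cs.length : Int) + 1) 1).flatMap (pvPiece cs M) := by
  induction M generalizing a with
  | nil =>
    show PySem.List.slice cs (some a) none = _
    rw [PySem.List.slice_from cs ha0]
    have ht := pvTailChars cs a.toNat (by omega)
    rw [show ((a.toNat : Nat) : Int) = a from by omega] at ht
    rw [← ht]
    apply pvFlatMap_congr
    intro i _
    simp [pvPiece]
  | cons x r ih =>
    obtain ⟨t, p⟩ := x
    have hap : a ≤ p := (hM (t, p) (by simp)).1
    have hpl : p ≤ (cs.length : Int) := (hM (t, p) (by simp)).2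
    have hr : ∀ tp ∈ r, p ≤ tp.2 ∧ tp.2 ≤ (cs.length : Int) := by
      intro tp htp
      exact ⟨(List.pairwise_cons.mp hs).1 tp htp, (hM tp (by simp [htp])).2⟩
    have hs' := (List.pairwise_cons.mp hs).2
    show PySem.List.slice cs (some a) (some p) ++ t.toList ++ pvBf cs p r = _
    rw [PySem.List.pyRange_one_append a p ((cs.length : Int) + 1) hap (by omega), List.flatMap_append]
    have c1 : (PySem.List.pyRange a p 1).flatMap (pvPiece cs ((t, p) :: r))
        = PySem.List.slice cs (some a) (some p) := by
      have e1 : ∀ i ∈ PySem.List.pyRange a p 1,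
          pvPiece cs ((t, p) :: r) i
            = (if i < (cs.length : Int) then [PySem.List.pyGetD cs i ' '] else []) := by
        intro i hi
        rw [PySem.List.mem_pyRange_one] at hi
        unfold pvPiece
        have hfil : (((t, p) :: r).filter (fun tp => tp.2 == i)) = [] := by
          rw [List.filter_eq_nil_iff]
          intro tp htp
          simp only [List.mem_cons] at htp
          rcases htp with rfl | htp
          · simp only [beq_iff_eq]; omega
          · have := (hr tp htp).1
            simp only [beq_iff_eq]; omega
        rw [hfil]
        simp
      rw [pvFlatMap_congr e1]
      have hm := pvMidChars cs a.toNat p.toNat (by omega) (by omega)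
      rw [show ((a.toNat : Nat) : Int) = a from by omega,
          show ((p.toNat : Nat) : Int) = p from by omega] at hm
      rw [hm, PySem.List.slice_toNat cs ha0 (by omega)]
    rw [c1]
    have hpp : pvPiece cs ((t, p) :: r) p = t.toList ++ pvPiece cs r p := by
      unfold pvPiece
      rw [show (((t, p) :: r).filter (fun tp => tp.2 == p)) = (t, p) :: r.filter (fun tp => tp.2 == p) from by
        simp]
      simp [List.append_assoc]
    have e2 : ∀ i ∈ PySem.List.pyRange (p + 1) ((cs.length : Int) + 1) 1,
        pvPiece cs ((t, p) :: r) i = pvPiece cs r i := by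
      intro i hi
      rw [PySem.List.mem_pyRange_one] at hi
      unfold pvPiece
      rw [show (((t, p) :: r).filter (fun tp => tp.2 == i)) = r.filter (fun tp => tp.2 == i) from by
        rw [List.filter_cons]
        simp only [beq_iff_eq]
        rw [if_neg (by omega)]]
    rw [PySem.List.pyRange_one_cons (by omega : p < (cs.length : Int) + 1), List.flatMap_cons]
    rw [hpp, pvFlatMap_congr e2]
    rw [ih p (by omega) hpl hr hs']
    rw [PySem.List.pyRange_one_cons (by omega : p < (cs.length : Int) + 1), List.flatMap_cons]
    simp [List.append_assoc]

lemma pvGroups_filter (l : List (String × Int)) (b i : Int) (h0 : 0 ≤ i) (hb : i < b) :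
    (pvGroups l 0 b).filter (fun tp => tp.2 == i) = l.filter (fun tp => tp.2 == i) := by
  unfold pvGroups
  rw [PySem.List.pyRange_one_append 0 i b h0 (le_of_lt hb), List.flatMap_append, List.filter_append]
  rw [PySem.List.pyRange_one_cons hb, List.flatMap_cons, List.filter_append]
  have h1 : ((PySem.List.pyRange 0 i 1).flatMap fun j => l.filter (fun tp => tp.2 == j)).filter
      (fun tp => tp.2 == i) = [] := by
    rw [List.filter_eq_nil_iff]
    intro tp htp hcon
    simp only [List.mem_flatMap, List.mem_filter, PySem.List.mem_pyRange_one, beq_iff_eq] at htp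
    obtain ⟨j, ⟨_, hji⟩, _, hj⟩ := htp
    simp only [beq_iff_eq] at hcon
    omega
  have h2 : ((PySem.List.pyRange (i + 1) b 1).flatMap fun j => l.filter (fun tp => tp.2 == j)).filter
      (fun tp => tp.2 == i) = [] := by
    rw [List.filter_eq_nil_iff]
    intro tp htp hcon
    simp only [List.mem_flatMap, List.mem_filter, PySem.List.mem_pyRange_one, beq_iff_eq] at htp
    obtain ⟨j, ⟨hji, _⟩, _, hj⟩ := htp
    simp only [beq_iff_eq] at hcon
    omega
  have h3 : (l.filter (fun tp => tp.2 == i)).filter (fun tp => tp.2 == i)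
      = l.filter (fun tp => tp.2 == i) := by
    rw [List.filter_filter]
    apply List.filter_congr
    intro tp _
    by_cases h : tp.2 = i <;> simp [h]
  rw [h1, h2, h3]
  simp

lemma pvA_eq_canon (init_line : String) (lines : List (String × Int)) (n : Int) :
    (insert_lines init_line lines n).toList = pvCanon init_line.toList lines := by
  simp only [insert_lines, PySem.Str.len_eq]
  rw [pvJoin_str]
  have hswap : lines.foldl (fun d tp => d.modify tp.2 [] (· ++ [tp.1])) PySem.Dict.empty
      = (lines.map Prod.swap).foldl (fun d p => d.modify p.1 [] (· ++ [p.2])) PySem.Dict.empty := by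
    rw [List.foldl_map]
    apply PySem.List.foldl_congr_mem
    intro acc x _
    simp
  have hd : ∀ i : Int,
      (lines.foldl (fun d tp => d.modify tp.2 [] (· ++ [tp.1])) PySem.Dict.empty).getD i []
        = (lines.filter (fun tp => tp.2 == i)).map (fun tp => tp.1) := by
    intro i
    rw [hswap, PySem.Dict.getD_foldl_modify_append]
    rw [PySem.Dict.getD_empty]
    rw [List.filter_map]
    simp [List.map_map, Function.comp_def]
  have hc : ∀ i : Int,
      (lines.foldl (fun d tp => d.modify tp.2 [] (· ++ [tp.1])) PySem.Dict.empty).contains i = false →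
        (lines.filter (fun tp => tp.2 == i)) = [] := by
    intro i h
    have h2 := PySem.Dict.getD_of_not_contains _ ([] : List String) h
    rw [hd i] at h2
    exact List.map_eq_nil_iff.mp h2
  rw [PySem.List.foldl_congr_mem _ _
      (fun acc i => acc ++ pvPieceS init_line.toList lines i) _ ?hcong]
  case hcong =>
    intro acc i _
    by_cases hco : (lines.foldl (fun d tp => d.modify tp.2 [] (· ++ [tp.1])) PySem.Dict.empty).contains i = true
    · simp only [hco, if_true]
      rw [hd i]
      unfold pvPieceS
      split <;> simp [List.append_assoc]
    · have hco' : (lines.foldl (fun d tp => d.modify tp.2 [] (· ++ [tp.1])) PySem.Dict.empty).contains i = false := by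
        simpa using hco
      simp only [hco', Bool.false_eq_true, if_false]
      unfold pvPieceS
      rw [hc i hco']
      split <;> simp
  rw [PySem.List.foldl_append_eq_flatMap, List.nil_append, pvJoin_flatMap]
  unfold pvCanon
  apply pvFlatMap_congr
  intro i _
  exact pvJoin_pieceS init_line.toList lines i

lemma pvB_eq_canon (init_line : String) (lines : List (String × Int)) (n : Int) :
    (insert_lines_alt init_line lines n).toList = pvCanon init_line.toList lines := by
  simp only [insert_lines_alt]
  rw [pvJoin_str]
  have hfold : ∀ (M : List (String × Int)) (acc : List String) (prev : Int),
      pvJoin ((M.foldl (fun (st : List String × Int) tp =>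
            (st.1 ++ [PySem.Str.slice init_line (some st.2) (some tp.2), tp.1], tp.2)) (acc, prev)).1
          ++ [PySem.Str.slice init_line
                (some (M.foldl (fun (st : List String × Int) tp =>
                  (st.1 ++ [PySem.Str.slice init_line (some st.2) (some tp.2), tp.1], tp.2)) (acc, prev)).2)
                none])
        = pvJoin acc ++ pvBf init_line.toList prev M := by
    intro M
    induction M with
    | nil =>
      intro acc prev
      simp [pvBf, pvJoin, PySem.Str.toList_slice, PySem.Chars.slice_eq_listSlice]
    | cons x r ih =>
      intro acc prev
      obtain ⟨t, p⟩ := x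
      simp only [List.foldl_cons]
      rw [ih]
      show pvJoin (acc ++ [PySem.Str.slice init_line (some prev) (some p), t]) ++ _ = _
      simp [pvBf, pvJoin, PySem.Str.toList_slice, PySem.Chars.slice_eq_listSlice,
        List.append_assoc]
  rw [hfold]
  have hmem : ∀ tp ∈ PySem.List.sorted
      (lines.filter (fun tp => decide (0 ≤ tp.2) && decide (tp.2 ≤ PySem.Str.len init_line)))
      (fun tp => tp.2), 0 ≤ tp.2 ∧ tp.2 ≤ (init_line.toList.length : Int) := by
    intro tp h
    rw [PySem.List.mem_sorted] at h
    have := (List.mem_filter.mp h).2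
    simpa using this
  have hpw := PySem.List.sorted_pairwise
      (lines.filter (fun tp => decide (0 ≤ tp.2) && decide (tp.2 ≤ PySem.Str.len init_line)))
      (fun tp => tp.2)
  have hb := pvBf_eq init_line.toList
      (PySem.List.sorted
        (lines.filter (fun tp => decide (0 ≤ tp.2) && decide (tp.2 ≤ PySem.Str.len init_line)))
        (fun tp => tp.2))
      0 le_rfl (Int.natCast_nonneg _) hmem (by simpa using hpw)
  rw [hb]
  have hS : PySem.List.sorted
        (lines.filter (fun tp => decide (0 ≤ tp.2) && decide (tp.2 ≤ PySem.Str.len init_line)))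
        (fun tp => tp.2)
      = pvGroups (lines.filter (fun tp => decide (0 ≤ tp.2) && decide (tp.2 ≤ PySem.Str.len init_line)))
          0 ((init_line.toList.length : Int) + 1) := by
    apply pvSorted_eq_groups
    intro tp htp
    have := (List.mem_filter.mp htp).2
    simp only [PySem.Str.len_eq, Bool.and_eq_true, decide_eq_true_eq] at this
    omega
  unfold pvCanon
  simp only [pvJoin, List.map_nil, List.flatten_nil, List.nil_append]
  apply pvFlatMap_congr
  intro i hi
  rw [PySem.List.mem_pyRange_one] at hi
  have hfi : (PySem.List.sorted
        (lines.filter (fun tp => decide (0 ≤ tp.2) && decide (tp.2 ≤ PySem.Str.len init_line)))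
        (fun tp => tp.2)).filter (fun tp => tp.2 == i)
      = lines.filter (fun tp => tp.2 == i) := by
    rw [hS, pvGroups_filter _ _ i hi.1 hi.2]
    rw [List.filter_filter]
    apply List.filter_congr
    intro tp _
    by_cases h : tp.2 = i
    · have h2 : i ≤ (init_line.length : Int) := by
        have h3 := hi.2
        rw [String.length_toList] at h3
        omega
      simp [h, hi.1, h2]
    · simp [h]
  unfold pvPiece
  rw [hfi]

-- ===== VERDICT (by name: the statement is the Claim_ definition above) =====
theorem insert_lines_spec : Claim_equal_insert_lines := by
  intro init_line lines n _
  unfold Spec_insert_lines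
  have h := (pvA_eq_canon init_line lines n).trans (pvB_eq_canon init_line lines n).symm
  exact String.toList_injective h
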